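-- pv_equiv track=rewrite | github.com/vATCSCC/PERTI | scripts/update_playbook_routes.py | format_route_with_dots
-- ===== SOURCE A (Python) =====
-- def is_procedure_name(name: str) -> bool:
--     """
--     Check if a name looks like a STAR/SID procedure name.
--     These typically end in a single digit (1-9).
--     E.g., JJEDI4, ONDRE1, GLAVN2, OOSHN5, BRWNZ4
--     """
--     if not name:
--         return False
--     name = name.strip().upper()
--     # Must be at least 4 chars, end with a digit 1-9
--     if len(name) < 4:
--         return False
--     if name[-1] not in '123456789':
--         return False
--     # Rest should be letters (procedure base name)
--     if not name[:-1].isalpha():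
--         return False
--     return True
--
-- def format_route_with_dots(route_str: str) -> str:
--     """
--     Format a route string with proper dot notation for STAR/SID procedures.
--
--     E.g., "SKWKR JJEDI4" -> "SKWKR.JJEDI4"
--     E.g., "GLAVN GLAVN2" -> "GLAVN.GLAVN2"
--     """
--     if not route_str:
--         return route_str
--
--     parts = route_str.split()
--     if len(parts) < 2:
--         return route_str
--
--     result = []
--     i = 0
--     while i < len(parts):
--         current = parts[i]
--
--         # Check if next part is a procedure and current is a fix
--         if i + 1 < len(parts):
--             next_part = parts[i + 1]
--             if is_procedure_name(next_part) and not is_procedure_name(current):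
--                 # Connect with dot: FIX.PROCEDURE
--                 result.append(f"{current}.{next_part}")
--                 i += 2
--                 continue
--
--         result.append(current)
--         i += 1
--
--     return ' '.join(result)
-- ===== SOURCE B (Python) =====
-- def is_procedure_name(name: str) -> bool:
--     if not name:
--         return False
--     name = name.strip().upper()
--     if len(name) < 4:
--         return False
--     if name[-1] not in '123456789':
--         return False
--     if not name[:-1].isalpha():
--         return False
--     return True
--
-- def format_route_with_dots(route_str: str) -> str:
--     # Separator insertion over adjacent pairs instead of A's index-driven
--     # greedy pair consumption: a procedure token is never a left-hand fix,
--     # so the local per-boundary decision reproduces the greedy result.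
--     if not route_str:
--         return route_str
--     parts = route_str.split()
--     if len(parts) < 2:
--         return route_str
--     out = parts[0]
--     for prev, cur in zip(parts, parts[1:]):
--         out += ('.' + cur) if is_procedure_name(cur) and not is_procedure_name(prev) else (' ' + cur)
--     return out
-- ===== Notes on version B (the rewrite author's own statement) =====
-- stated objective: simpler
-- what changed: Replaced the index-driven while loop that greedily consumes FIX+PROCEDURE pairs (with i += 2 skips) by a single zip(parts, parts[1:]) pass that chooses the separator ('.' or ' ') locally at each adjacent boundary, exploiting that a procedure token can never act as a left-hand fix.
import Mathlib
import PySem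

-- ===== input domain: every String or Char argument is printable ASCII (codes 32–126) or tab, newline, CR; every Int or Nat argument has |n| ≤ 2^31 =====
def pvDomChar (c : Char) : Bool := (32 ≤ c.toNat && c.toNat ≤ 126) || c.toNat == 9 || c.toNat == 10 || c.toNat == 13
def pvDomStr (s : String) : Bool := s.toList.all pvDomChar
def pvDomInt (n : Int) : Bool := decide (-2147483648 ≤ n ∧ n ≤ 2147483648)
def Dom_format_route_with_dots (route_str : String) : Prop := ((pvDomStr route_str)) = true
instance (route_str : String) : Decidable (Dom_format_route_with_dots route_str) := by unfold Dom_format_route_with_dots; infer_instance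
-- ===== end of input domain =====

-- B replaces A's index-driven greedy pair-consuming while loop by a single pass over
-- adjacent token pairs that decides each separator locally (objective: simpler).

-- ===== PORT A =====
-- shared module helper: is_procedure_name (used verbatim by both Pythons)
def is_procedure_name (name : String) : Bool :=
  if name.toList = [] then false
  else
    let cs := PySem.Chars.upper (PySem.Chars.strip name.toList)
    if cs.length < 4 then false
    else
      match PySem.List.pyGet? cs (-1) with
      | none => false   -- unreachable: cs has length ≥ 4
      | some c =>
        if !(PySem.Chars.isIn [c] "123456789".toList) then false
        else if !(PySem.Chars.strIsalpha (PySem.Chars.slice cs none (some (-1)))) then false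
        else true

-- the while loop of A: i advances by 2 when a FIX.PROCEDURE pair is consumed, else by 1
def pvLoopA : List String → List String
  | [] => []
  | [x] => [x]
  | x :: y :: rest =>
    if is_procedure_name y && !is_procedure_name x then
      (x ++ "." ++ y) :: pvLoopA rest
    else
      x :: pvLoopA (y :: rest)

def format_route_with_dots (route_str : String) : String :=
  if route_str = "" then route_str
  else if (PySem.Str.split₀ route_str).length < 2 then route_str
  else PySem.Str.join " " (pvLoopA (PySem.Str.split₀ route_str))

-- ===== PORT B =====
-- B's single pass: out starts as parts[0]; each adjacent pair contributes '.'+cur or ' '+cur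
def pvStepB (out : String) (pc : String × String) : String :=
  if is_procedure_name pc.2 && !is_procedure_name pc.1 then out ++ "." ++ pc.2
  else out ++ " " ++ pc.2

def format_route_with_dots_alt (route_str : String) : String :=
  if route_str = "" then route_str
  else if (PySem.Str.split₀ route_str).length < 2 then route_str
  else
    match PySem.Str.split₀ route_str with
    | [] => route_str   -- unreachable: parts.length ≥ 2
    | p0 :: rest => (((p0 :: rest).zip rest).foldl pvStepB p0)

-- ===== PRECONDITION & SPEC =====
def Spec_format_route_with_dots (route_str : String) (out : String) : Prop := out = format_route_with_dots_alt route_str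
instance (route_str : String) (out : String) : Decidable (Spec_format_route_with_dots route_str out) := by unfold Spec_format_route_with_dots; infer_instance

-- ===== CLAIM (what is proved, stated in full; the proofs are below) =====
def Claim_equal_format_route_with_dots : Prop := ∀ (route_str : String), Dom_format_route_with_dots route_str → Spec_format_route_with_dots route_str (format_route_with_dots route_str)

-- ===== LEMMAS AND PROOFS =====

-- the character sequence both programs append after the first token
def pvTail (prev : String) : List String → List Char
  | [] => []
  | y :: t =>
    (if is_procedure_name y && !is_procedure_name prev then '.' :: y.toList else ' ' :: y.toList)
      ++ pvTail y t

lemma pvLoopA_ne_nil (x : String) (l : List String) : pvLoopA (x :: l) ≠ [] := by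
  cases l with
  | nil => simp [pvLoopA]
  | cons y t => unfold pvLoopA; split_ifs <;> simp

-- A's joined result, characterised head-and-tail
lemma pvA_char : ∀ l : List String,
    PySem.Chars.join [' '] ((pvLoopA l).map String.toList)
      = (match l with | [] => [] | x :: rest => x.toList ++ pvTail x rest) := by
  intro l
  induction l using pvLoopA.induct with
  | case1 => simp [pvLoopA, PySem.Chars.join_nil]
  | case2 x => simp [pvLoopA, PySem.Chars.join_singleton, pvTail]
  | case3 x y rest hcond ih =>
    have hy : is_procedure_name y = true := by
      simpa using (Bool.and_elim_left hcond)
    have hx : is_procedure_name x = false := by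
      simpa using (Bool.and_elim_right hcond)
    cases rest with
    | nil =>
      simp [pvLoopA, pvTail, String.toList_append, hy, hx]
    | cons z rs =>
      obtain ⟨h, t, hht⟩ := List.exists_cons_of_ne_nil (pvLoopA_ne_nil z rs)
      unfold pvLoopA
      rw [if_pos hcond, List.map_cons, hht, List.map_cons, PySem.Chars.join_cons_cons,
        ← List.map_cons, ← hht, ih]
      simp [pvTail, hy, hx, String.toList_append]
  | case4 x y rest hcond ih =>
    obtain ⟨h, t, hht⟩ := List.exists_cons_of_ne_nil (pvLoopA_ne_nil y rest)
    unfold pvLoopA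
    rw [if_neg hcond, List.map_cons, hht, List.map_cons, PySem.Chars.join_cons_cons,
      ← List.map_cons, ← hht, ih]
    have hcond' : (is_procedure_name y && !is_procedure_name x) = false := by
      simpa using hcond
    simp [pvTail, hcond']

lemma pvTail_cons (prev y : String) (t : List String) :
    pvTail prev (y :: t)
      = (if is_procedure_name y && !is_procedure_name prev then '.' :: y.toList
         else ' ' :: y.toList) ++ pvTail y t := rfl

-- B's fold, characterised the same way
lemma pvB_char : ∀ (l : List String) (prev acc : String),
    (((prev :: l).zip l).foldl pvStepB acc).toList = acc.toList ++ pvTail prev l := by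
  intro l
  induction l with
  | nil => intro prev acc; simp [pvTail]
  | cons y t ih =>
    intro prev acc
    have : ((prev :: y :: t).zip (y :: t)) = (prev, y) :: ((y :: t).zip t) := by simp
    rw [this, List.foldl_cons, ih, pvTail_cons]
    unfold pvStepB
    split_ifs with h <;> simp [String.toList_append]

-- ===== VERDICT (by name: the statement is the Claim_ definition above) =====
theorem format_route_with_dots_spec : Claim_equal_format_route_with_dots := by
  intro route_str _
  unfold Spec_format_route_with_dots format_route_with_dots format_route_with_dots_alt
  split_ifs with h1 h2
  · rfl
  · rfl
  · -- both take the main branch: parts has ≥ 2 elements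
    cases hp : PySem.Str.split₀ route_str with
    | nil => rw [hp] at h2; simp at h2
    | cons p0 rest =>
      show PySem.Str.join " " (pvLoopA (p0 :: rest)) = ((p0 :: rest).zip rest).foldl pvStepB p0
      apply String.toList_inj.mp
      rw [show (PySem.Str.join " " (pvLoopA (p0 :: rest))).toList
            = PySem.Chars.join " ".toList ((pvLoopA (p0 :: rest)).map String.toList) from
          PySem.Str.toList_join _ _]
      rw [pvB_char rest p0 p0]
      exact pvA_char (p0 :: rest)
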